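-- pv_equiv track=rewrite | github.com/toxirin1999/gym-django-app | entrenos/services/evaluacion_profesional_service.py | _generar_resumen_progresion
-- ===== SOURCE A (Python) =====
-- def _generar_resumen_progresion(evaluaciones):
--     """Genera resumen de la progresión."""
--     if not evaluaciones:
--         return "Sin datos de progresión disponibles."
--
--     en_regresion = len([e for e in evaluaciones if e['estado'] == 'regresion'])
--     estancados = len([e for e in evaluaciones if e['estado'] == 'estancado'])
--     progresando = len([e for e in evaluaciones if e['estado'] in ['normal', 'excelente']])
--
--     if en_regresion > 0:
--         return f"⚠️ {en_regresion} ejercicio(s) en regresión. Prioridad: revisar volumen, recuperación y nutrición."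
--     elif estancados > progresando:
--         return f"📊 Mayoría de ejercicios estancados ({estancados}/{len(evaluaciones)}). Considera variar el estímulo."
--     else:
--         return f"✅ Buena progresión general ({progresando}/{len(evaluaciones)} ejercicios mejorando)."
-- ===== SOURCE B (Python) =====
-- _CONTRIB = {
--     'regresion': (1, 0, 0),
--     'estancado': (0, 1, 0),
--     'normal': (0, 0, 1),
--     'excelente': (0, 0, 1),
-- }
--
--
-- def _generar_resumen_progresion(evaluaciones):
--     """Genera resumen de la progresión."""
--     if not evaluaciones:
--         return "Sin datos de progresión disponibles."
--
--     # map each evaluación to a contribution vector, reduce by component-wise sum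
--     tallies = [_CONTRIB.get(e['estado'], (0, 0, 0)) for e in evaluaciones]
--     en_regresion, estancados, progresando = (sum(c) for c in zip(*tallies))
--
--     if en_regresion > 0:
--         return f"⚠️ {en_regresion} ejercicio(s) en regresión. Prioridad: revisar volumen, recuperación y nutrición."
--     elif estancados > progresando:
--         return f"📊 Mayoría de ejercicios estancados ({estancados}/{len(evaluaciones)}). Considera variar el estímulo."
--     else:
--         return f"✅ Buena progresión general ({progresando}/{len(evaluaciones)} ejercicios mejorando)."
-- ===== Notes on version B (the rewrite author's own statement) =====
-- stated objective: alternative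
-- what changed: Replaces the three separate list-comprehension scans with a map-reduce: each evaluacion is mapped to a contribution vector (r,s,p) via a static classification table, and the three counts are the component-wise vector sum (zip + sum) of that single mapped list.
import Mathlib
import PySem

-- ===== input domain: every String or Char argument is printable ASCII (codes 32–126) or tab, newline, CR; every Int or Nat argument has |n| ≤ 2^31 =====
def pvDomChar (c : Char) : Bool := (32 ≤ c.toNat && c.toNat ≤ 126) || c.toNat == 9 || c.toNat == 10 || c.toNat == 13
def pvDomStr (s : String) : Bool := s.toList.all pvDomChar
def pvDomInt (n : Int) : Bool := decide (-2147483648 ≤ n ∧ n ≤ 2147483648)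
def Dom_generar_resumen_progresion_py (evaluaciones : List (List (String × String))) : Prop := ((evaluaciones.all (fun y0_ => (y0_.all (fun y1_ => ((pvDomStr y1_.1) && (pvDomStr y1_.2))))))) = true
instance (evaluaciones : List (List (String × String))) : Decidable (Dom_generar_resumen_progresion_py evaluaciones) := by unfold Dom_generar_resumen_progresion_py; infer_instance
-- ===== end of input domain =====

-- B maps each evaluación to a contribution vector via a static classification table and reduces by component-wise sum, instead of A's three filter scans (alternative map-reduce decomposition).


-- ===== PORT A =====
-- e['estado'] (total form: Pre_ guarantees the key is present, so the default is never read)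
def pvEstado (e : List (String × String)) : String := (PySem.Dict.ofList e).getD "estado" ""

def generar_resumen_progresion_py (evaluaciones : List (List (String × String))) : String :=
  if evaluaciones = [] then "Sin datos de progresión disponibles."
  else
    let en_regresion : Int := PySem.List.len (evaluaciones.filter (fun e => pvEstado e == "regresion"))
    let estancados : Int := PySem.List.len (evaluaciones.filter (fun e => pvEstado e == "estancado"))
    let progresando : Int := PySem.List.len (evaluaciones.filter (fun e => decide (pvEstado e ∈ (["normal", "excelente"] : List String))))
    if en_regresion > 0 then
      "⚠️ " ++ PySem.Int.toStr en_regresion ++ " ejercicio(s) en regresión. Prioridad: revisar volumen, recuperación y nutrición."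
    else if estancados > progresando then
      "📊 Mayoría de ejercicios estancados (" ++ PySem.Int.toStr estancados ++ "/" ++ PySem.Int.toStr (PySem.List.len evaluaciones) ++ "). Considera variar el estímulo."
    else
      "✅ Buena progresión general (" ++ PySem.Int.toStr progresando ++ "/" ++ PySem.Int.toStr (PySem.List.len evaluaciones) ++ " ejercicios mejorando)."

-- ===== PORT B =====
-- the module-level classification table _CONTRIB
def pvContribTable : PySem.Dict String (Int × Int × Int) :=
  PySem.Dict.ofList [("regresion", (1, 0, 0)), ("estancado", (0, 1, 0)), ("normal", (0, 0, 1)), ("excelente", (0, 0, 1))]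

def generar_resumen_progresion_py_alt (evaluaciones : List (List (String × String))) : String :=
  if evaluaciones = [] then "Sin datos de progresión disponibles."
  else
    let tallies : List (Int × Int × Int) := evaluaciones.map (fun e => pvContribTable.getD (pvEstado e) (0, 0, 0))
    let en_regresion : Int := (tallies.map (·.1)).sum
    let estancados : Int := (tallies.map (·.2.1)).sum
    let progresando : Int := (tallies.map (·.2.2)).sum
    if en_regresion > 0 then
      "⚠️ " ++ PySem.Int.toStr en_regresion ++ " ejercicio(s) en regresión. Prioridad: revisar volumen, recuperación y nutrición."
    else if estancados > progresando then
      "📊 Mayoría de ejercicios estancados (" ++ PySem.Int.toStr estancados ++ "/" ++ PySem.Int.toStr (PySem.List.len evaluaciones) ++ "). Considera variar el estímulo."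
    else
      "✅ Buena progresión general (" ++ PySem.Int.toStr progresando ++ "/" ++ PySem.Int.toStr (PySem.List.len evaluaciones) ++ " ejercicios mejorando)."

-- ===== PRECONDITION & SPEC =====
-- Pre_ excludes exactly the inputs where some evaluación lacks the key 'estado': there Python A raises KeyError.
def Pre_generar_resumen_progresion_py (evaluaciones : List (List (String × String))) : Prop :=
  ∀ e ∈ evaluaciones, "estado" ∈ e.map Prod.fst
instance (evaluaciones : List (List (String × String))) : Decidable (Pre_generar_resumen_progresion_py evaluaciones) := by unfold Pre_generar_resumen_progresion_py; infer_instance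
def pvWitness_generar_resumen_progresion_py : (List (List (String × String))) := [[("estado", "normal")], [("estado", "estancado")]]

def Spec_generar_resumen_progresion_py (evaluaciones : List (List (String × String))) (out : String) : Prop := out = generar_resumen_progresion_py_alt evaluaciones
instance (evaluaciones : List (List (String × String))) (out : String) : Decidable (Spec_generar_resumen_progresion_py evaluaciones out) := by unfold Spec_generar_resumen_progresion_py; infer_instance

-- ===== CLAIM (what is proved, stated in full; the proofs are below) =====
def Claim_equal_generar_resumen_progresion_py : Prop := ∀ (evaluaciones : List (List (String × String))), Dom_generar_resumen_progresion_py evaluaciones → Pre_generar_resumen_progresion_py evaluaciones → Spec_generar_resumen_progresion_py evaluaciones (generar_resumen_progresion_py evaluaciones)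

-- ===== LEMMAS AND PROOFS =====

-- the classification table written out as a literal dict (used to evaluate lookups)
lemma tbl : pvContribTable = PySem.Dict.mk [("regresion", (1, 0, 0)), ("estancado", (0, 1, 0)), ("normal", (0, 0, 1)), ("excelente", (0, 0, 1))] := by decide

-- the three components of a table lookup, as 0/1 indicators of the state
lemma contrib_fst (s : String) :
    (pvContribTable.getD s (0, 0, 0)).1 = if s = "regresion" then (1 : Int) else 0 := by
  rw [tbl]
  by_cases h1 : s = "regresion" <;> by_cases h2 : s = "estancado" <;>
    by_cases h3 : s = "normal" <;> by_cases h4 : s = "excelente" <;>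
    simp_all [PySem.Dict.getD, PySem.Dict.get?_mk_cons, PySem.Dict.get?,
      show ("regresion" = s) ↔ (s = "regresion") from eq_comm,
      show ("estancado" = s) ↔ (s = "estancado") from eq_comm,
      show ("normal" = s) ↔ (s = "normal") from eq_comm,
      show ("excelente" = s) ↔ (s = "excelente") from eq_comm]

lemma contrib_snd (s : String) :
    (pvContribTable.getD s (0, 0, 0)).2.1 = if s = "estancado" then (1 : Int) else 0 := by
  rw [tbl]
  by_cases h1 : s = "regresion" <;> by_cases h2 : s = "estancado" <;>
    by_cases h3 : s = "normal" <;> by_cases h4 : s = "excelente" <;>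
    simp_all [PySem.Dict.getD, PySem.Dict.get?_mk_cons, PySem.Dict.get?,
      show ("regresion" = s) ↔ (s = "regresion") from eq_comm,
      show ("estancado" = s) ↔ (s = "estancado") from eq_comm,
      show ("normal" = s) ↔ (s = "normal") from eq_comm,
      show ("excelente" = s) ↔ (s = "excelente") from eq_comm]

lemma contrib_thd (s : String) :
    (pvContribTable.getD s (0, 0, 0)).2.2 =
      (if s = "normal" then (1 : Int) else 0) + (if s = "excelente" then (1 : Int) else 0) := by
  rw [tbl]
  by_cases h1 : s = "regresion" <;> by_cases h2 : s = "estancado" <;>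
    by_cases h3 : s = "normal" <;> by_cases h4 : s = "excelente" <;>
    simp_all [PySem.Dict.getD, PySem.Dict.get?_mk_cons, PySem.Dict.get?,
      show ("regresion" = s) ↔ (s = "regresion") from eq_comm,
      show ("estancado" = s) ↔ (s = "estancado") from eq_comm,
      show ("normal" = s) ↔ (s = "normal") from eq_comm,
      show ("excelente" = s) ↔ (s = "excelente") from eq_comm]

-- A's filter length equals the 0/1 indicator sum B computes
lemma len_filter_eq_sum (l : List (List (String × String))) (p : List (String × String) → Bool) :
    PySem.List.len (l.filter p) = (l.map (fun e => if p e then (1 : Int) else 0)).sum := by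
  induction l with
  | nil => rfl
  | cons e l ih =>
    by_cases h : p e <;> simp_all [PySem.List.len_eq, List.filter_cons] <;> omega

-- ===== VERDICT (by name: the statement is the Claim_ definition above) =====
theorem generar_resumen_progresion_py_spec : Claim_equal_generar_resumen_progresion_py := by
  intro ev _ _
  unfold Spec_generar_resumen_progresion_py generar_resumen_progresion_py generar_resumen_progresion_py_alt
  by_cases h : ev = []
  · simp [h]
  · simp only [h, if_false, List.map_map]
    have hr : PySem.List.len (ev.filter (fun e => pvEstado e == "regresion"))
        = (ev.map (fun e => (pvContribTable.getD (pvEstado e) (0, 0, 0)).1)).sum := by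
      rw [len_filter_eq_sum]
      refine congrArg List.sum (List.map_congr_left fun e _ => ?_)
      rw [contrib_fst]; simp
    have hs : PySem.List.len (ev.filter (fun e => pvEstado e == "estancado"))
        = (ev.map (fun e => (pvContribTable.getD (pvEstado e) (0, 0, 0)).2.1)).sum := by
      rw [len_filter_eq_sum]
      refine congrArg List.sum (List.map_congr_left fun e _ => ?_)
      rw [contrib_snd]; simp
    have hp : PySem.List.len (ev.filter (fun e => decide (pvEstado e ∈ (["normal", "excelente"] : List String))))
        = (ev.map (fun e => (pvContribTable.getD (pvEstado e) (0, 0, 0)).2.2)).sum := by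
      rw [len_filter_eq_sum]
      refine congrArg List.sum (List.map_congr_left fun e _ => ?_)
      rw [contrib_thd]
      by_cases h3 : pvEstado e = "normal" <;> by_cases h4 : pvEstado e = "excelente" <;> simp_all
    simp only [Function.comp_def]
    rw [hr, hs, hp]
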